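-- pv_equiv track=rewrite | github.com/stanfordnlp/stanza | stanza/utils/confusion.py | confusion_to_accuracy
-- ===== SOURCE A (Python) =====
-- def confusion_to_accuracy(confusion_matrix):
--     """
--     Given a confusion dictionary, return correct, total
--     """
--     correct = 0
--     total = 0
--     for l1 in confusion_matrix.keys():
--         for l2 in confusion_matrix[l1].keys():
--             if l1 == l2:
--                 correct = correct + confusion_matrix[l1][l2]
--             else:
--                 total = total + confusion_matrix[l1][l2]
--     return correct, (correct + total)
-- ===== SOURCE B (Python) =====
-- def confusion_to_accuracy(confusion_matrix):
--     """
--     Given a confusion dictionary, return correct, total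
--     """
--     total = sum(sum(inner.values()) for inner in confusion_matrix.values())
--     correct = sum(inner[l] for l, inner in confusion_matrix.items() if l in inner)
--     return correct, total
-- ===== Notes on version B (the rewrite author's own statement) =====
-- stated objective: simpler
-- what changed: Replaces the branching double loop that separately accumulates diagonal and off-diagonal counts by two direct sums: the grand total as a sum over all cells and correct as the diagonal-only sum guarded by key membership.
import Mathlib
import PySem

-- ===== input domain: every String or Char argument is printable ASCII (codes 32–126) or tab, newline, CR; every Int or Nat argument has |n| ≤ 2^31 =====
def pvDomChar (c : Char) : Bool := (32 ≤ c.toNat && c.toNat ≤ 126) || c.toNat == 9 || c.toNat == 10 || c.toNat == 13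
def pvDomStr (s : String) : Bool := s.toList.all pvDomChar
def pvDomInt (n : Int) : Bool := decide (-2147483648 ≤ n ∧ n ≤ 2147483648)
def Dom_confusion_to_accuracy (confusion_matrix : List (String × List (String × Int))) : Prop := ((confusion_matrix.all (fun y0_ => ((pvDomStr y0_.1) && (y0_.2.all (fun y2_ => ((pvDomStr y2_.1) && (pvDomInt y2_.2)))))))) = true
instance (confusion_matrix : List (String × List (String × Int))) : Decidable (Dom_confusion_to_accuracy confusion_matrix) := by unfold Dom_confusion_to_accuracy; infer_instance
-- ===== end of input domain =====

-- B replaces A's branching double loop by two direct sums (grand total over all cells,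
-- diagonal-only sum guarded by key membership): simpler, same cost.


-- ===== PORT A =====
def confusion_to_accuracy (confusion_matrix : List (String × List (String × Int))) : Int × Int :=
  let d : PySem.Dict String (PySem.Dict String Int) :=
    PySem.Dict.mk (confusion_matrix.map (fun p => (p.1, PySem.Dict.mk p.2)))
  let st :=
    d.keys.foldl (fun (st : Int × Int) l1 =>
      ((d.getD l1 (PySem.Dict.mk [])).keys).foldl (fun (st : Int × Int) l2 =>
        if l1 == l2 then
          (st.1 + (d.getD l1 (PySem.Dict.mk [])).getD l2 0, st.2)
        else
          (st.1, st.2 + (d.getD l1 (PySem.Dict.mk [])).getD l2 0)) st) (0, 0)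
  (st.1, st.1 + st.2)

-- ===== PORT B =====
def confusion_to_accuracy_alt (confusion_matrix : List (String × List (String × Int))) : Int × Int :=
  let total := (confusion_matrix.map (fun p => (p.2.map (fun q => q.2)).sum)).sum
  let correct := ((confusion_matrix.filter (fun p => (PySem.Dict.mk p.2).contains p.1)).map
      (fun p => (PySem.Dict.mk p.2).getD p.1 0)).sum
  (correct, total)

-- ===== PRECONDITION & SPEC =====
-- Pre_ excludes association lists with duplicate outer or inner keys: a Python dict cannot
-- hold duplicate keys, so no dict input of A corresponds to such a list and the assoc-list
-- reading of either program there is accidental.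
def Pre_confusion_to_accuracy (confusion_matrix : List (String × List (String × Int))) : Prop :=
  (confusion_matrix.map (fun p => p.1)).Nodup ∧
  ∀ p ∈ confusion_matrix, (p.2.map (fun q => q.1)).Nodup
instance (confusion_matrix : List (String × List (String × Int))) : Decidable (Pre_confusion_to_accuracy confusion_matrix) := by unfold Pre_confusion_to_accuracy; infer_instance

def pvWitness_confusion_to_accuracy : (List (String × List (String × Int))) :=
  [("a", [("a", 3), ("b", 1)]), ("b", [("a", 2), ("b", 5)])]

def Spec_confusion_to_accuracy (confusion_matrix : List (String × List (String × Int))) (out : Int × Int) : Prop := out = confusion_to_accuracy_alt confusion_matrix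
instance (confusion_matrix : List (String × List (String × Int))) (out : Int × Int) : Decidable (Spec_confusion_to_accuracy confusion_matrix out) := by unfold Spec_confusion_to_accuracy; infer_instance

-- ===== CLAIM (what is proved, stated in full; the proofs are below) =====
def Claim_equal_confusion_to_accuracy : Prop := ∀ (confusion_matrix : List (String × List (String × Int))), Dom_confusion_to_accuracy confusion_matrix → Pre_confusion_to_accuracy confusion_matrix → Spec_confusion_to_accuracy confusion_matrix (confusion_to_accuracy confusion_matrix)

-- ===== LEMMAS AND PROOFS =====

-- diagonal contribution of one row of A's inner loop
def pvDsum (l1 : String) (inner : List (String × Int)) : Int :=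
  ((inner.filter (fun q => l1 == q.1)).map (fun q => q.2)).sum

-- A's inner loop, once lookups are resolved, adds the diagonal part to .1 and the rest to .2
theorem pv_inner_fold (l1 : String) (inner : List (String × Int)) (st : Int × Int) :
    inner.foldl (fun (st : Int × Int) q =>
        if l1 == q.1 then (st.1 + q.2, st.2) else (st.1, st.2 + q.2)) st
    = (st.1 + pvDsum l1 inner, st.2 + ((inner.map (fun q => q.2)).sum - pvDsum l1 inner)) := by
  induction inner generalizing st with
  | nil => simp [pvDsum]
  | cons q rest ih =>
    rw [List.foldl_cons, ih]
    by_cases h : l1 == q.1 <;>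
      simp [pvDsum, h, Prod.ext_iff] <;> ring

-- resolve A's inner-loop lookups: fold over keys of a Nodup dict = fold over the pairs
theorem pv_inner_keys (l1 : String) (inner : List (String × Int))
    (hnd : (inner.map (fun q => q.1)).Nodup) (st : Int × Int) :
    (PySem.Dict.mk inner).keys.foldl (fun (st : Int × Int) l2 =>
        if l1 == l2 then (st.1 + (PySem.Dict.mk inner).getD l2 0, st.2)
        else (st.1, st.2 + (PySem.Dict.mk inner).getD l2 0)) st
    = inner.foldl (fun (st : Int × Int) q =>
        if l1 == q.1 then (st.1 + q.2, st.2) else (st.1, st.2 + q.2)) st := by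
  rw [PySem.Dict.keys_mk, List.foldl_map]
  apply PySem.List.foldl_congr_mem
  intro acc q hq
  have hget : (PySem.Dict.mk inner).getD q.1 0 = q.2 := by
    apply PySem.Dict.getD_of_mem_items
    · exact hq
    · simpa [PySem.Dict.keys_mk] using hnd
  rw [hget]

-- with Nodup inner keys the diagonal contribution is B's guarded lookup
theorem pv_dsum_eq (l1 : String) (inner : List (String × Int))
    (hnd : (inner.map (fun q => q.1)).Nodup) :
    pvDsum l1 inner
    = (if (PySem.Dict.mk inner).contains l1 then (PySem.Dict.mk inner).getD l1 0 else 0) := by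
  induction inner with
  | nil => simp [pvDsum, PySem.Dict.contains]
  | cons q rest ih =>
    obtain ⟨k, v⟩ := q
    simp only [List.map_cons, List.nodup_cons] at hnd
    by_cases h : l1 = k
    · have hfilter : rest.filter (fun r => l1 == r.1) = [] := by
        apply List.filter_eq_nil_iff.mpr
        intro r hr hbeq
        exact hnd.1 (List.mem_map.mpr ⟨r, hr, (by simpa using hbeq : l1 = r.1).symm.trans h⟩)
      rw [h] at hfilter
      simp [pvDsum, h, hfilter, PySem.Dict.contains_mk,
        PySem.Dict.getD_eq_get?_getD, PySem.Dict.get?_mk_cons]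
    · have hb : (k == l1) = false := by
        simp only [beq_eq_false_iff_ne, ne_eq]
        exact fun e => h e.symm
      have hl : (l1 == k) = false := by simpa using h
      rw [show pvDsum l1 ((k, v) :: rest) = pvDsum l1 rest by
          simp [pvDsum, hl], ih hnd.2]
      simp only [PySem.Dict.contains_mk, List.any_cons, hb, Bool.false_or]
      simp [PySem.Dict.getD_eq_get?_getD, PySem.Dict.get?_mk_cons, hb]

-- sum over a filtered-then-mapped list as a sum of guarded terms
theorem pv_filter_map_sum (l : List (String × List (String × Int)))
    (P : String × List (String × Int) → Bool) (f : String × List (String × Int) → Int) :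
    ((l.filter P).map f).sum = (l.map (fun x => if P x then f x else 0)).sum := by
  induction l with
  | nil => simp
  | cons x xs ih => by_cases h : P x <;> simp [h, ih]

-- A's outer loop accumulates the row sums componentwise
theorem pv_outer_fold (cm : List (String × List (String × Int))) (st : Int × Int) :
    cm.foldl (fun (st : Int × Int) p =>
        (st.1 + pvDsum p.1 p.2,
         st.2 + ((p.2.map (fun q => q.2)).sum - pvDsum p.1 p.2))) st
    = (st.1 + (cm.map (fun p => pvDsum p.1 p.2)).sum,
       st.2 + ((cm.map (fun p => (p.2.map (fun q => q.2)).sum)).sum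
               - (cm.map (fun p => pvDsum p.1 p.2)).sum)) := by
  induction cm generalizing st with
  | nil => simp
  | cons p rest ih => simp [ih]; constructor <;> ring

-- ===== VERDICT (by name: the statement is the Claim_ definition above) =====
theorem confusion_to_accuracy_spec : Claim_equal_confusion_to_accuracy := by
  intro cm _ hpre
  obtain ⟨hout, hin⟩ := hpre
  unfold Spec_confusion_to_accuracy confusion_to_accuracy confusion_to_accuracy_alt
  simp only []
  -- resolve the outer lookups: keys of d are cm's keys, d.getD p.1 is p's row
  have hkeys : (PySem.Dict.mk (cm.map (fun p => (p.1, PySem.Dict.mk p.2)))).keys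
      = cm.map (fun p => p.1) := by
    simp [PySem.Dict.keys_mk, List.map_map, Function.comp]
  have hdnodup : (PySem.Dict.mk (cm.map (fun p => (p.1, PySem.Dict.mk p.2)))).keys.Nodup := by
    rw [hkeys]; exact hout
  have hrow : ∀ p ∈ cm,
      (PySem.Dict.mk (cm.map (fun p => (p.1, PySem.Dict.mk p.2)))).getD p.1 (PySem.Dict.mk [])
      = PySem.Dict.mk p.2 := by
    intro p hp
    apply PySem.Dict.getD_of_mem_items
    · exact List.mem_map.mpr ⟨p, hp, rfl⟩
    · exact hdnodup
  rw [hkeys, List.foldl_map]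
  rw [PySem.List.foldl_congr_mem _ _
      (fun (st : Int × Int) p =>
        (st.1 + pvDsum p.1 p.2,
         st.2 + ((p.2.map (fun q => q.2)).sum - pvDsum p.1 p.2))) _
      (by
        intro acc p hp
        rw [hrow p hp, pv_inner_keys p.1 p.2 (hin p hp) acc, pv_inner_fold])]
  rw [pv_outer_fold]
  rw [pv_filter_map_sum]
  have hcong : cm.map (fun x => if (PySem.Dict.mk x.2).contains x.1
        then (PySem.Dict.mk x.2).getD x.1 0 else 0)
      = cm.map (fun p => pvDsum p.1 p.2) := by
    apply List.map_congr_left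
    intro p hp
    exact (pv_dsum_eq p.1 p.2 (hin p hp)).symm
  rw [hcong]
  rw [Prod.mk.injEq]
  constructor <;> simp
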